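-- pv_equiv track=rewrite | github.com/JaviGames184/uva.par | Práctica 2/Deslizator_JavierRamosJimeno.py | bloques_en_linea
-- ===== SOURCE A (Python) =====
-- CH_FICH = ord('A')
--
-- def bloques_en_linea(lin):
-- 	inicio, ancho, caracter_anterior = 0, 0, ' '
-- 	for caracter in lin:
-- 		if caracter != caracter_anterior:
-- 			if caracter_anterior != ' ':
-- 				yield (inicio-ancho, inicio-1, ord(caracter_anterior.upper())-CH_FICH)	#Columna inicial - Columna Final - Color
-- 			caracter_anterior = caracter
-- 			ancho = 1
-- 		else:
-- 			ancho += 1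
-- 		inicio += 1
-- 	if caracter_anterior != ' ':
-- 		yield (inicio-ancho, inicio-1, ord(caracter_anterior.upper())-CH_FICH)
-- ===== SOURCE B (Python) =====
-- CH_FICH = ord('A')
--
-- def bloques_en_linea(lin):
--     n = len(lin)
--     i = 0
--     while i < n:
--         c = lin[i]
--         if c == ' ':
--             i += 1
--         else:
--             j = i + 1
--             while j < n and lin[j] == c:
--                 j += 1
--             yield (i, j - 1, ord(c.upper()) - CH_FICH)
--             i = j
-- ===== Notes on version B (the rewrite author's own statement) =====
-- stated objective: simpler
-- what changed: Replaces the single-pass state machine (previous-char/width/start accumulators with an end-of-loop flush) by a two-pointer scan that finds each run's end directly and yields the block immediately, with no carried state and no post-loop flush.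
import Mathlib
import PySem

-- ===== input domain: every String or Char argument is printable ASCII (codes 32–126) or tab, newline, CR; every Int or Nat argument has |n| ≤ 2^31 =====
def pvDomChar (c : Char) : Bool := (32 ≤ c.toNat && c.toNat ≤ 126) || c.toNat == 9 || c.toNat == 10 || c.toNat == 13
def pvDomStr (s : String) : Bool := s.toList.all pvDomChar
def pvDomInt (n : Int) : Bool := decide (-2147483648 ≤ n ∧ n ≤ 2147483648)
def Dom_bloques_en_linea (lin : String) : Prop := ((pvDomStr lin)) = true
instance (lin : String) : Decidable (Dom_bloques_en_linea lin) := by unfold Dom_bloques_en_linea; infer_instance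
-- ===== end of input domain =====

-- B replaces A's carried-state single-pass machine (prev char / width / flush at end) by a
-- stateless two-pointer scan that locates each run's end directly; same O(n) cost, simpler.
-- Both Pythons are generators; equivalence is about the sequence of yielded triples.

-- ord(c.upper()) - CH_FICH, shared color arithmetic of both sources
def pvColor (c : Char) : Int := (PySem.Chars.upperChar c).toNat - 65

-- ===== PORT A =====
-- loop state: inicio, ancho, caracter_anterior; final flush after the loop
def pvAGo : List Char → Int → Int → Char → List (Int × Int × Int)
  | [], inicio, ancho, prev =>
      if prev ≠ ' ' then [(inicio - ancho, inicio - 1, pvColor prev)] else []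
  | c :: cs, inicio, ancho, prev =>
      if c ≠ prev then
        (if prev ≠ ' ' then [(inicio - ancho, inicio - 1, pvColor prev)] else [])
          ++ pvAGo cs (inicio + 1) 1 c
      else
        pvAGo cs (inicio + 1) (ancho + 1) prev

def bloques_en_linea (lin : String) : List (Int × Int × Int) :=
  pvAGo lin.toList 0 0 ' '

-- ===== PORT B =====
-- two-pointer scan: skip a space, else take the whole run (inner while = takeWhile) and emit it
def pvBGo : List Char → Int → List (Int × Int × Int)
  | [], _ => []
  | c :: rest, i =>
      if c = ' ' then pvBGo rest (i + 1)
      else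
        let k := (rest.takeWhile (· == c)).length
        (i, i + (k : Int), pvColor c) :: pvBGo (rest.drop k) (i + (k : Int) + 1)
termination_by cs _ => cs.length
decreasing_by
  all_goals simp [List.length_drop]

def bloques_en_linea_alt (lin : String) : List (Int × Int × Int) :=
  pvBGo lin.toList 0

-- ===== PRECONDITION & SPEC =====
def Spec_bloques_en_linea (lin : String) (out : List (Int × Int × Int)) : Prop := out = bloques_en_linea_alt lin
instance (lin : String) (out : List (Int × Int × Int)) : Decidable (Spec_bloques_en_linea lin out) := by unfold Spec_bloques_en_linea; infer_instance

-- ===== CLAIM (what is proved, stated in full; the proofs are below) =====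
def Claim_equal_bloques_en_linea : Prop := ∀ (lin : String), Dom_bloques_en_linea lin → Spec_bloques_en_linea lin (bloques_en_linea lin)

-- ===== LEMMAS AND PROOFS =====

-- with prev = ' ', the accumulated width is never read
theorem pvAGo_width_irrel : ∀ (cs : List Char) (i m m' : Int),
    pvAGo cs i m ' ' = pvAGo cs i m' ' ' := by
  intro cs
  induction cs with
  | nil => intro i m m'; simp [pvAGo]
  | cons c cs ih =>
      intro i m m'
      by_cases h : c = ' '
      · subst h; simp [pvAGo]; exact ih _ _ _
      · simp [pvAGo, h]

-- a run of k copies of the current character just advances inicio and ancho by k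
theorem pvAGo_run : ∀ (k : Nat) (cs : List Char) (i n : Int) (c : Char),
    pvAGo (List.replicate k c ++ cs) i n c = pvAGo cs (i + k) (n + k) c := by
  intro k
  induction k with
  | zero => intro cs i n c; simp
  | succ k ih =>
      intro cs i n c
      have h1 : i + ((k : Int) + 1) = i + 1 + k := by ring
      have h2 : n + ((k : Int) + 1) = n + 1 + k := by ring
      rw [List.replicate_succ, List.cons_append]
      rw [show pvAGo (c :: (List.replicate k c ++ cs)) i n c
            = pvAGo (List.replicate k c ++ cs) (i + 1) (n + 1) c by simp [pvAGo]]
      rw [ih]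
      push_cast
      rw [h1, h2]

-- at a run boundary (or end of input) the pending block is flushed and the machine restarts
theorem pvAGo_break : ∀ (rest : List Char) (j m : Int) (c : Char), c ≠ ' ' →
    (∀ d rs, rest = d :: rs → d ≠ c) →
    pvAGo rest j m c = (j - m, j - 1, pvColor c) :: pvAGo rest j 0 ' ' := by
  intro rest j m c hc hb
  cases rest with
  | nil => simp [pvAGo, hc]
  | cons d rs =>
      have hd : d ≠ c := hb d rs rfl
      by_cases hds : d = ' '
      · subst hds
        simp [pvAGo, hd, hc]
      · simp [pvAGo, hd, hc, hds]

theorem dropWhile_head_ne (c : Char) : ∀ (l : List Char) (d : Char) (rs : List Char),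
    l.dropWhile (· == c) = d :: rs → d ≠ c := by
  intro l
  induction l with
  | nil => intro d rs h; simp at h
  | cons x xs ih =>
      intro d rs h
      by_cases hx : x = c
      · subst hx
        rw [List.dropWhile_cons_of_pos (by simp)] at h
        exact ih d rs h
      · rw [List.dropWhile_cons_of_neg (by simp [hx])] at h
        cases h
        exact hx

theorem pv_dropWhile_eq_drop : ∀ (l : List Char) (c : Char),
    l.dropWhile (· == c) = l.drop (l.takeWhile (· == c)).length := by
  intro l
  induction l with
  | nil => intro c; simp
  | cons x xs ih =>
      intro c
      by_cases hx : x = c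
      · rw [List.dropWhile_cons_of_pos (by simp [hx]), List.takeWhile_cons_of_pos (by simp [hx])]
        simpa using ih c
      · rw [List.dropWhile_cons_of_neg (by simp [hx]), List.takeWhile_cons_of_neg (by simp [hx])]
        simp

theorem pvMain : ∀ (n : Nat) (cs : List Char) (i : Int), cs.length ≤ n →
    pvAGo cs i 0 ' ' = pvBGo cs i := by
  intro n
  induction n with
  | zero =>
      intro cs i h
      have : cs = [] := List.eq_nil_of_length_eq_zero (Nat.le_zero.mp h)
      subst this; simp [pvAGo, pvBGo]
  | succ n ih =>
      intro cs i h
      cases cs with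
      | nil => simp [pvAGo, pvBGo]
      | cons c cs' =>
          have hlen : cs'.length ≤ n := by simpa using h
          by_cases hc : c = ' '
          · subst hc
            rw [show pvAGo (' ' :: cs') i 0 ' ' = pvAGo cs' (i + 1) 1 ' ' by simp [pvAGo]]
            rw [pvAGo_width_irrel cs' (i + 1) 1 0, ih cs' (i + 1) hlen]
            simp [pvBGo]
          · -- A takes the new-character branch (no flush since prev = ' ')
            have step : pvAGo (c :: cs') i 0 ' ' = pvAGo cs' (i + 1) 1 c := by
              simp [pvAGo, hc]
            set k := (cs'.takeWhile (· == c)).length with hk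
            have hsplit : cs' = List.replicate k c ++ cs'.dropWhile (· == c) := by
              conv_lhs => rw [← List.takeWhile_append_dropWhile (p := (· == c)) (l := cs')]
              congr 1
              refine List.eq_replicate_of_mem ?_
              intro b hb
              have := List.mem_takeWhile_imp hb
              simpa using this
            have hdrop : cs'.dropWhile (· == c) = cs'.drop k := by
              rw [hk]; exact pv_dropWhile_eq_drop cs' c
            have hrest : (cs'.drop k).length ≤ n := by
              simp [List.length_drop]; omega
            rw [step]
            conv_lhs => rw [hsplit]
            rw [pvAGo_run k (cs'.dropWhile (· == c)) (i + 1) 1 c, hdrop]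
            rw [pvAGo_break (cs'.drop k) (i + 1 + k) (1 + k) c hc
              (by intro d rs hdr; exact dropWhile_head_ne c cs' d rs (hdrop ▸ hdr))]
            rw [ih (cs'.drop k) (i + 1 + k) hrest]
            have e1 : i + 1 + (k : Int) - (1 + k) = i := by ring
            have e2 : i + 1 + (k : Int) - 1 = i + k := by ring
            have e3 : i + 1 + (k : Int) = i + k + 1 := by ring
            rw [e1, e2, e3]
            simp [pvBGo, hc, ← hk]

-- ===== VERDICT (by name: the statement is the Claim_ definition above) =====
theorem bloques_en_linea_spec : Claim_equal_bloques_en_linea := by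
  intro lin _
  unfold Spec_bloques_en_linea bloques_en_linea bloques_en_linea_alt
  exact pvMain lin.toList.length lin.toList 0 le_rfl
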